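-- pv_equiv track=rewrite | github.com/Boosya/Hackerrank | Algorithms/Bit manipulation/great_xor.py | theGreatXor
-- ===== SOURCE A (Python) =====
-- def theGreatXor(x):
--     answer = 0 # will count the number of such a's
--     i = 0 # shifting
--     while (x >> i)!= 0: # move number to the right
--         if (x >> i)&1 == 0: # if the digit at position i from the rihgt is 0
--             answer += 2**i # the positions to the right form this digit can be any - 0 or 1
--         i += 1
--     return answer
-- ===== SOURCE B (Python) =====
-- def theGreatXor(x):
--     # closed form: every zero bit below the top set bit contributes its place value,
--     # and those contributions sum to (2**bit_length - 1) - x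
--     return (1 << x.bit_length()) - 1 - x
-- ===== Notes on version B (the rewrite author's own statement) =====
-- stated objective: simpler
-- what changed: Replaced the bit-by-bit while loop, which accumulates the place value of every zero bit of x, by a single closed-form arithmetic expression built from x.bit_length().
import Mathlib
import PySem

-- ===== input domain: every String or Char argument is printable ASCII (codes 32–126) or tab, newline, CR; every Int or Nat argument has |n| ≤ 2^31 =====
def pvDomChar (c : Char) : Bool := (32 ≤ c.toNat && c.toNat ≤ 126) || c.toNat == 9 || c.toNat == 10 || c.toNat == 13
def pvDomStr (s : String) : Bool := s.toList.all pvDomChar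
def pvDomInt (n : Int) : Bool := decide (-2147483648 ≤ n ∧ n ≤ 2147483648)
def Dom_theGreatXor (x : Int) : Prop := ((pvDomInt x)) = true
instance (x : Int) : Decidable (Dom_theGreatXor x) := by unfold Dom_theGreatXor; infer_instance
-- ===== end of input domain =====

-- B replaces A's bit-by-bit while loop by the closed form (1 << x.bit_length()) - 1 - x (objective: simpler).

-- ===== PORT A =====
-- faithful port of A's while loop; `fuel` only makes the recursion total (x.natAbs + 1 bounds the
-- number of iterations on every input where the Python loop terminates)
def theGreatXorLoop (fuel : Nat) (x : Int) (i : Nat) (answer : Int) : Int :=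
  match fuel with
  | 0 => answer
  | fuel + 1 =>
    if x >>> i = 0 then answer
    else theGreatXorLoop fuel x (i + 1)
      (if PySem.Int.band (x >>> i) 1 = 0 then answer + 2 ^ i else answer)

def theGreatXor (x : Int) : Int := theGreatXorLoop (x.natAbs + 1) x 0 0

-- ===== PORT B =====
def theGreatXor_alt (x : Int) : Int := ((1 : Int) <<< PySem.Int.bitLength x) - 1 - x

-- ===== PRECONDITION & SPEC =====
-- Pre_ excludes negative x: there Python A's while loop never terminates (the shifted value
-- stays negative forever), so A returns only on nonnegative inputs.
def Pre_theGreatXor (x : Int) : Prop := 0 ≤ x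
instance (x : Int) : Decidable (Pre_theGreatXor x) := by unfold Pre_theGreatXor; infer_instance
def pvWitness_theGreatXor : Int := 10

def Spec_theGreatXor (x : Int) (out : Int) : Prop := out = theGreatXor_alt x
instance (x : Int) (out : Int) : Decidable (Spec_theGreatXor x out) := by unfold Spec_theGreatXor; infer_instance

-- ===== CLAIM (what is proved, stated in full; the proofs are below) =====
def Claim_equal_theGreatXor : Prop := ∀ (x : Int), Dom_theGreatXor x → Pre_theGreatXor x → Spec_theGreatXor x (theGreatXor x)

-- ===== LEMMAS AND PROOFS =====

-- loop invariant: once x >>> i is the natural number m, the loop adds 2^i * ((2^bitLength m - 1) - m)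
lemma theGreatXorLoop_eq (m : Nat) : ∀ (x : Int) (i : Nat) (ans : Int) (fuel : Nat),
    x >>> i = (m : Int) → m < fuel →
    theGreatXorLoop fuel x i ans
      = ans + 2 ^ i * ((2 : Int) ^ PySem.Int.bitLength (m : Int) - 1 - (m : Int)) := by
  induction m using Nat.strong_induction_on with
  | _ m ih =>
    intro x i ans fuel hshift hfuel
    match fuel with
    | 0 => omega
    | fuel + 1 =>
      by_cases hm : m = 0
      · subst hm
        simp [theGreatXorLoop, hshift, pysem]
      · have hm0 : 0 < m := Nat.pos_of_ne_zero hm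
        have hne : x >>> i ≠ 0 := by
          rw [hshift]; exact_mod_cast hm
        have hnext : x >>> (i + 1) = ((m / 2 : Nat) : Int) := by
          have h1 : x >>> (i + 1) = (x >>> i) >>> (1 : Nat) := Int.shiftRight_add x i 1
          rw [h1, hshift]
          rw [show ((m : Int) >>> (1 : Nat)) = ((m >>> 1 : Nat) : Int) from rfl]
          norm_num [Nat.shiftRight_eq_div_pow]
        have hrec := ih (m / 2) (by omega) x (i + 1)
          (if PySem.Int.band (x >>> i) 1 = 0 then ans + 2 ^ i else ans) fuel hnext (by omega)
        rw [theGreatXorLoop, if_neg hne, hrec]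
        have hband : PySem.Int.band (x >>> i) 1 = ((m % 2 : Nat) : Int) := by
          rw [hshift]
          rw [show ((1 : Int)) = ((1 : Nat) : Int) from rfl, PySem.Int.band_natCast]
          norm_num [Nat.and_one_is_mod]
        have hbl : PySem.Int.bitLength (m : Int)
            = PySem.Int.bitLength ((m / 2 : Nat) : Int) + 1 := PySem.Int.bitLength_natCast hm0
        have hmdecomp : (m : Int) = 2 * ((m / 2 : Nat) : Int) + ((m % 2 : Nat) : Int) := by
          push_cast; omega
        rw [hband, hbl, hmdecomp]
        rcases Nat.mod_two_eq_zero_or_one m with h2 | h2 <;>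
          simp only [h2] <;> push_cast <;> ring_nf

lemma one_shiftLeft_int (k : Nat) : ((1 : Int) <<< k) = (2 : Int) ^ k := by
  rw [show ((1 : Int) <<< k) = (((1 <<< k : Nat)) : Int) from rfl]
  push_cast [Nat.shiftLeft_eq]
  ring

-- ===== VERDICT (by name: the statement is the Claim_ definition above) =====
theorem theGreatXor_spec : Claim_equal_theGreatXor := by
  intro x _ hpre
  have hx : (x.toNat : Int) = x := Int.toNat_of_nonneg hpre
  have h0 : x >>> (0 : Nat) = (x.toNat : Int) := by simp [hx]
  have hlt : x.toNat < x.natAbs + 1 := by omega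
  unfold Spec_theGreatXor theGreatXor theGreatXor_alt
  rw [theGreatXorLoop_eq x.toNat x 0 0 _ h0 hlt, one_shiftLeft_int, hx]
  ring
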